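-- pv_equiv track=rewrite | github.com/pk-021/DupeNuke | detect.py | group_similar_images
-- ===== SOURCE A (Python) =====
-- from collections import defaultdict
--
-- def group_similar_images(near_duplicates):
--     """
--     Groups images based on near-duplicate pairs.
--
--     Args:
--         near_duplicates: List of tuples (imgA, imgB, similarity)
--
--     Returns:
--         List of lists, where each inner list is a group of similar images.
--     """
--     parent = {}
--
--     # Initialize parent pointers for all images found in pairs
--     def make_set(x):
--         if x not in parent:
--             parent[x] = x
--
--     # Find root leader of group containing x
--     def find(x):
--         while parent[x] != x:
--             parent[x] = parent[parent[x]]  # path compression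
--             x = parent[x]
--         return x
--
--     # Union groups of x and y
--     def union(x, y):
--         root_x = find(x)
--         root_y = find(y)
--         if root_x != root_y:
--             parent[root_y] = root_x
--
--     # Initialize sets for all images in near_duplicates
--     for a, b, _ in near_duplicates:
--         make_set(a)
--         make_set(b)
--
--     # Union similar image pairs
--     for a, b, _ in near_duplicates:
--         union(a, b)
--
--     # Group images by their root leader
--     clusters = defaultdict(list)
--     for img in parent:
--         root = find(img)
--         clusters[root].append(img)
--
--     return list(clusters.values())
-- ===== SOURCE B (Python) =====
-- def group_similar_images(near_duplicates):
--     """Single-pass label propagation: each image carries a component label;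
--     when a pair bridges two labels, relabel one class eagerly."""
--     label = {}
--     for a, b, _ in near_duplicates:
--         if a not in label:
--             label[a] = a
--         if b not in label:
--             label[b] = b
--         la, lb = label[a], label[b]
--         if la != lb:
--             for k in label:
--                 if label[k] == lb:
--                     label[k] = la
--     clusters = {}
--     for img in label:
--         k = label[img]
--         clusters[k] = clusters.get(k, []) + [img]
--     return list(clusters.values())
-- ===== Notes on version B (the rewrite author's own statement) =====
-- stated objective: simpler
-- what changed: Replaces A's path-compressed union-find (parent dict, find/union with a while loop, then a find per node when grouping) by a single pass of eager label propagation: each image carries a component label and when a pair bridges two labels one class is relabelled in place, so no find machinery or second union pass is needed; the final grouping in node-insertion order is kept.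
import Mathlib
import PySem

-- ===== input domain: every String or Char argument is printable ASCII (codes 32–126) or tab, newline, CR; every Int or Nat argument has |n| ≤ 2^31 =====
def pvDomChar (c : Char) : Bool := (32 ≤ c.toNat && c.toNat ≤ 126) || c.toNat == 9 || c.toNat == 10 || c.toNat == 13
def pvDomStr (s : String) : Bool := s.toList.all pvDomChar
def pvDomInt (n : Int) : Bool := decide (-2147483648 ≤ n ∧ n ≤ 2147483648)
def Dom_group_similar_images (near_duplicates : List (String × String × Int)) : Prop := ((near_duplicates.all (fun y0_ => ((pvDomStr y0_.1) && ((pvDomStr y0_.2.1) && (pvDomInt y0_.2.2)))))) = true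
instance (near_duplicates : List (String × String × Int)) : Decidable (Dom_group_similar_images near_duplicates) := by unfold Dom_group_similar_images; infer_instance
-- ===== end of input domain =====

-- B replaces A's path-compressed union-find by a single-pass eager label-propagation
-- (merge-by-relabel) pass; objective: simpler (one loop over the pairs, no find/union
-- machinery), same return value.

-- ===== PORT A =====
-- find(x): 'while parent[x] != x: parent[x] = parent[parent[x]]; x = parent[x]'.
-- The while loop is ported with a fuel bound of parent.size + 1 at each call site;
-- the proofs below show this fuel is always sufficient (the parent chain visits
-- distinct keys), so the port computes exactly what the Python while loop computes.
def findA (p : PySem.Dict String String) (x : String) : Nat → String × PySem.Dict String String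
  | 0 => (x, p)
  | fuel+1 =>
    let px := p.getD x x
    if px = x then (x, p)
    else
      let ppx := p.getD px px
      findA (p.insert x ppx) ppx fuel

-- union(x, y)
def unionA (p : PySem.Dict String String) (a b : String) : PySem.Dict String String :=
  let r1 := findA p a (p.size + 1)
  let r2 := findA r1.2 b (r1.2.size + 1)
  if r1.1 ≠ r2.1 then r2.2.insert r2.1 r1.1 else r2.2

def group_similar_images (near_duplicates : List (String × String × Int)) : List (List String) :=
  -- make_set loop
  let p0 := near_duplicates.foldl (fun d t =>
      let d1 := if d.contains t.1 then d else d.insert t.1 t.1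
      if d1.contains t.2.1 then d1 else d1.insert t.2.1 t.2.1) PySem.Dict.empty
  -- union loop
  let p2 := near_duplicates.foldl (fun d t => unionA d t.1 t.2.1) p0
  -- grouping loop: 'for img in parent' iterates the keys; find mutates parent as it goes
  let st := p2.keys.foldl
      (fun (s : PySem.Dict String (List String) × PySem.Dict String String) img =>
        let r := findA s.2 img (s.2.size + 1)
        (s.1.modify r.1 [] (· ++ [img]), r.2)) (PySem.Dict.empty, p2)
  st.1.values

-- ===== PORT B =====
-- 'for k in label: if label[k] == lb: label[k] = la' — rewrite values in place, order kept
def relabelB (L : PySem.Dict String String) (la lb : String) : PySem.Dict String String :=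
  PySem.Dict.mk (L.items.map (fun kv => if kv.2 = lb then (kv.1, la) else kv))

def group_similar_images_alt (near_duplicates : List (String × String × Int)) : List (List String) :=
  let lab := near_duplicates.foldl (fun L t =>
      let L1 := if L.contains t.1 then L else L.insert t.1 t.1
      let L2 := if L1.contains t.2.1 then L1 else L1.insert t.2.1 t.2.1
      let la := L2.getD t.1 t.1
      let lb := L2.getD t.2.1 t.2.1
      if la ≠ lb then relabelB L2 la lb else L2) PySem.Dict.empty
  let clusters := lab.keys.foldl (fun d img =>
      let k := lab.getD img img
      d.insert k (d.getD k [] ++ [img])) PySem.Dict.empty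
  clusters.values

-- ===== PRECONDITION & SPEC =====
def Spec_group_similar_images (near_duplicates : List (String × String × Int)) (out : List (List String)) : Prop := out = group_similar_images_alt near_duplicates
instance (near_duplicates : List (String × String × Int)) (out : List (List String)) : Decidable (Spec_group_similar_images near_duplicates out) := by unfold Spec_group_similar_images; infer_instance

-- ===== CLAIM (what is proved, stated in full; the proofs are below) =====
def Claim_equal_group_similar_images : Prop := ∀ (near_duplicates : List (String × String × Int)), Dom_group_similar_images near_duplicates → Spec_group_similar_images near_duplicates (group_similar_images near_duplicates)

-- ===== LEMMAS AND PROOFS =====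

-- one parent-pointer step
def pstep (p : PySem.Dict String String) (x : String) : String := p.getD x x

def iterP (p : PySem.Dict String String) : Nat → String → String
  | 0, x => x
  | n+1, x => iterP p n (pstep p x)

-- x eventually reaches the fixpoint r by following parent pointers
def ReachesP (p : PySem.Dict String String) (x r : String) : Prop :=
  (∃ n, iterP p n x = r) ∧ pstep p r = r

-- nodes of a pair list, in first-appearance order (a then b per pair)
def nodesQ (Q : List (String × String)) : List String :=
  Q.foldl (fun N t => PySem.Set.add (PySem.Set.add N t.1) t.2) []

-- equivalence closure of the pair list
def EQ (Q : List (String × String)) (x y : String) : Prop :=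
  Relation.EqvGen (fun u v => (u, v) ∈ Q) x y

-- merge the class of b into the class of a, on representatives
def mergeK (h : String → String) (a b : String) : String → String :=
  fun z => if h z = h b then h a else h z

-- the union-find invariant: keys are N, parent pointers stay in N, every node reaches R y
def InvP (p : PySem.Dict String String) (N : List String) (R : String → String) : Prop :=
  p.keys = N ∧ (∀ y ∈ N, pstep p y ∈ N) ∧ (∀ y ∈ N, ReachesP p y (R y))

-- the label invariant of B: keys are the nodes seen so far, labels stay among the keys,
-- and label equality is exactly the equivalence closure of the processed pairs
def InvB (L : PySem.Dict String String) (Q : List (String × String)) : Prop :=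
  L.keys = nodesQ Q ∧ (∀ x ∈ L.keys, L.getD x x ∈ L.keys) ∧
    (∀ x ∈ L.keys, ∀ y ∈ L.keys, (L.getD x x = L.getD y y ↔ EQ Q x y))

theorem iterP_succ_right (p : PySem.Dict String String) (n : Nat) (x : String) :
    iterP p (n+1) x = pstep p (iterP p n x) := by
  induction n generalizing x with
  | zero => rfl
  | succ m ih => show iterP p (m+1) (pstep p x) = _; rw [ih]; rfl

theorem iterP_add (p : PySem.Dict String String) (m n : Nat) (x : String) :
    iterP p (m + n) x = iterP p n (iterP p m x) := by
  induction n with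
  | zero => rfl
  | succ k ih => rw [← Nat.add_assoc, iterP_succ_right, ih, ← iterP_succ_right]

theorem iterP_fix (p : PySem.Dict String String) (r : String) (h : pstep p r = r) (n : Nat) :
    iterP p n r = r := by
  induction n with
  | zero => rfl
  | succ k ih => rw [iterP_succ_right, ih, h]

-- a periodic point that reaches a fixpoint is that fixpoint
theorem periodic_eq_fix (p : PySem.Dict String String) (z r : String) (d m : Nat)
    (hd : 1 ≤ d) (hper : iterP p d z = z) (hm : iterP p m z = r) (hr : pstep p r = r) :
    z = r := by
  have hmul : ∀ k, iterP p (d * k) z = z := by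
    intro k; induction k with
    | zero => rfl
    | succ j ih => rw [Nat.mul_succ, iterP_add, ih, hper]
  have hge : m ≤ d * (m + 1) := by nlinarith
  have key := iterP_add p m (d * (m + 1) - m) z
  rw [Nat.add_sub_cancel' hge, hmul (m+1), hm, iterP_fix p r hr] at key
  exact key

theorem pstep_insert (p : PySem.Dict String String) (u v z : String) :
    pstep (p.insert u v) z = if z = u then v else pstep p z := by
  unfold pstep
  rw [PySem.Dict.getD_insert]

-- path compression step preserves every Reaches fact
theorem compress_preserves (p : PySem.Dict String String) (x : String)
    (hx : pstep p x ≠ x) :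
    ∀ y r, ReachesP p y r → ReachesP (p.insert x (pstep p (pstep p x))) y r := by
  intro y r hyr
  obtain ⟨⟨n, hn⟩, hr⟩ := hyr
  have hrx : r ≠ x := fun h => hx (h ▸ hr)
  refine ⟨?_, by rw [pstep_insert, if_neg hrx]; exact hr⟩
  have main : ∀ n y, iterP p n y = r →
      ∃ m, iterP (p.insert x (pstep p (pstep p x))) m y = r := by
    intro n
    induction n using Nat.strong_induction_on with
    | _ n ih =>
      intro y hyn
      match n, hyn with
      | 0, hyn => exact ⟨0, hyn⟩
      | (k+1), hyn =>
        rcases eq_or_ne x y with hy | hy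
        · subst hy
          match k, hyn with
          | 0, hyn =>
            have h1 : pstep p x = r := hyn
            exact ⟨1, by show pstep (p.insert x (pstep p (pstep p x))) x = r
                         rw [pstep_insert, if_pos rfl, h1, hr]⟩
          | (k'+1), hyn =>
            have hn' : iterP p k' (pstep p (pstep p x)) = r := hyn
            obtain ⟨m, hm⟩ := ih k' (by omega) _ hn'
            exact ⟨m+1, by show iterP _ m (pstep (p.insert x (pstep p (pstep p x))) x) = r
                           rw [pstep_insert, if_pos rfl]; exact hm⟩
        · have hn' : iterP p k (pstep p y) = r := hyn
          obtain ⟨m, hm⟩ := ih k (by omega) _ hn'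
          exact ⟨m+1, by show iterP _ m (pstep (p.insert x (pstep p (pstep p x))) y) = r
                         rw [pstep_insert, if_neg (Ne.symm hy)]; exact hm⟩
  exact main n y hn

-- linking root u to root v redirects exactly the class of u
theorem link_preserves (p : PySem.Dict String String) (u v : String)
    (hu : pstep p u = u) (hv : pstep p v = v) (huv : v ≠ u) :
    ∀ y r, ReachesP p y r → ReachesP (p.insert u v) y (if r = u then v else r) := by
  have hfixv : pstep (p.insert u v) v = v := by rw [pstep_insert, if_neg huv]; exact hv
  intro y r hyr
  obtain ⟨⟨n, hn⟩, hr⟩ := hyr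
  rcases eq_or_ne r u with hrueq | hrne
  · rw [if_pos hrueq]
    rw [hrueq] at hn
    have main : ∀ n y, iterP p n y = u → ∃ m, iterP (p.insert u v) m y = u := by
      intro n
      induction n with
      | zero => exact fun y h => ⟨0, h⟩
      | succ k ih =>
        intro y hy
        rcases eq_or_ne y u with h | h
        · exact ⟨0, h⟩
        · obtain ⟨m, hm⟩ := ih (pstep p y) hy
          exact ⟨m+1, by show iterP _ m (pstep (p.insert u v) y) = u
                         rw [pstep_insert, if_neg h]; exact hm⟩
    obtain ⟨m, hm⟩ := main n y hn
    exact ⟨⟨m+1, by rw [iterP_succ_right, hm, pstep_insert, if_pos rfl]⟩, hfixv⟩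
  · simp only [if_neg hrne]
    refine ⟨?_, by rw [pstep_insert, if_neg hrne]; exact hr⟩
    have main : ∀ n y, iterP p n y = r → ∃ m, iterP (p.insert u v) m y = r := by
      intro n
      induction n with
      | zero => exact fun y h => ⟨0, h⟩
      | succ k ih =>
        intro y hy
        have hyu : y ≠ u := by
          intro h
          rw [h, iterP_succ_right, iterP_fix p u hu, hu] at hy
          exact hrne hy.symm
        obtain ⟨m, hm⟩ := ih (pstep p y) hy
        exact ⟨m+1, by show iterP _ m (pstep (p.insert u v) y) = r
                       rw [pstep_insert, if_neg hyu]; exact hm⟩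
    exact main n y hn

-- ===== find: fuel sufficiency and full specification =====

theorem no_revisit (p : PySem.Dict String String) (x r : String) (n : Nat)
    (hn : iterP p n x = r) (hr : pstep p r = r) (hx : pstep p x ≠ x) :
    ∀ j, iterP p j x = x → j = 0 := by
  intro j hj
  by_contra h
  have hxr := periodic_eq_fix p x r j n (by omega) hj hn hr
  apply hx
  rw [hxr]; exact hr

theorem find_spec (fuel : Nat) : ∀ (p : PySem.Dict String String) (x r : String) (n : Nat),
    iterP p n x = r → pstep p r = r →
    (∀ j < n, pstep p (iterP p j x) ≠ iterP p j x) →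
    n < fuel →
    x ∈ p.keys → (∀ y ∈ p.keys, pstep p y ∈ p.keys) →
    ∃ q, findA p x fuel = (r, q) ∧ q.keys = p.keys ∧
      (∀ y ∈ q.keys, pstep q y ∈ q.keys) ∧
      (∀ y s, ReachesP p y s → ReachesP q y s) := by
  induction fuel with
  | zero => intro _ _ _ _ _ _ _ h; omega
  | succ f ih =>
    intro p x r n hn hr hmin hfuel hxk hcl
    by_cases hpx : pstep p x = x
    · have hn0 : n = 0 := by
        by_contra h
        exact hmin 0 (by omega) hpx
      subst hn0
      have hxr : x = r := hn
      refine ⟨p, ?_, rfl, hcl, fun y s h => h⟩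
      show (if p.getD x x = x then (x, p)
            else findA (p.insert x (p.getD (p.getD x x) (p.getD x x)))
              (p.getD (p.getD x x) (p.getD x x)) f) = (r, p)
      rw [if_pos (show p.getD x x = x from hpx), hxr]
    · have hn1 : 1 ≤ n := by
        rcases Nat.eq_zero_or_pos n with h0 | h0
        · exfalso; apply hpx; subst h0; rw [show x = r from hn]; exact hr
        · exact h0
      have heq : findA p x (f+1) = findA (p.insert x (pstep p (pstep p x))) (pstep p (pstep p x)) f := by
        show (if p.getD x x = x then (x, p)
              else findA (p.insert x (p.getD (p.getD x x) (p.getD x x)))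
                (p.getD (p.getD x x) (p.getD x x)) f) = _
        rw [if_neg (show ¬ p.getD x x = x from hpx)]
        rfl
      set ppx := pstep p (pstep p x) with hppxdef
      set p1 := p.insert x ppx with hp1
      have hpxk : pstep p x ∈ p.keys := hcl x hxk
      have hppxk : ppx ∈ p.keys := hcl _ hpxk
      have hk1 : p1.keys = p.keys := by
        rw [hp1]
        exact PySem.Dict.keys_insert_of_contains p ppx ((PySem.Dict.contains_iff_mem_keys p x).2 hxk)
      have hcl1 : ∀ y ∈ p1.keys, pstep p1 y ∈ p1.keys := by
        intro y hy
        rw [hk1] at hy ⊢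
        rw [hp1, pstep_insert]
        split
        · exact hppxk
        · exact hcl y hy
      have hrnex : r ≠ x := fun h => hpx (h ▸ hr)
      have hfix1 : pstep p1 r = r := by rw [hp1, pstep_insert, if_neg hrnex]; exact hr
      have hagree : ∀ j, j + 2 ≤ n → iterP p1 j ppx = iterP p (j+2) x := by
        intro j hj
        induction j with
        | zero => rfl
        | succ i ihj =>
          have hne : iterP p (i+2) x ≠ x := by
            intro h
            have := no_revisit p x r n hn hr hpx (i+2) h
            omega
          rw [iterP_succ_right, ihj (by omega), hp1, pstep_insert, if_neg hne,
              ← iterP_succ_right, show i+2+1 = i+1+2 from by omega]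
      rcases Nat.lt_or_ge n 2 with h2 | h2
      · have hn1' : n = 1 := by omega
        subst hn1'
        have hpxr : pstep p x = r := hn
        have hppxr : ppx = r := by rw [hppxdef, hpxr, hr]
        obtain ⟨q, hfq, hkq, hclq, hpres⟩ := ih p1 r r 0 rfl hfix1 (by omega) (by omega)
          (by rw [hk1, ← hppxr]; exact hppxk) hcl1
        refine ⟨q, ?_, by rw [hkq, hk1], hclq, ?_⟩
        · rw [heq, hppxr]; exact hfq
        · intro y s h
          exact hpres y s (compress_preserves p x hpx y s h)
      · have hn2 : iterP p1 (n-2) ppx = r := by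
          rw [hagree (n-2) (by omega), Nat.sub_add_cancel h2, hn]
        have hmin1 : ∀ j < n - 2, pstep p1 (iterP p1 j ppx) ≠ iterP p1 j ppx := by
          intro j hj
          rw [hagree j (by omega)]
          have hne : iterP p (j+2) x ≠ x := by
            intro h
            have := no_revisit p x r n hn hr hpx (j+2) h
            omega
          rw [hp1, pstep_insert, if_neg hne]
          exact hmin (j+2) (by omega)
        obtain ⟨q, hfq, hkq, hclq, hpres⟩ := ih p1 ppx r (n-2) hn2 hfix1 hmin1 (by omega)
          (by rw [hk1]; exact hppxk) hcl1
        refine ⟨q, ?_, by rw [hkq, hk1], hclq, ?_⟩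
        · rw [heq]; exact hfq
        · intro y s h
          exact hpres y s (compress_preserves p x hpx y s h)

-- every iterate of a node stays among the keys
theorem iterP_mem (p : PySem.Dict String String) (N : List String)
    (hcl : ∀ y ∈ N, pstep p y ∈ N) (x : String) (hx : x ∈ N) (n : Nat) :
    iterP p n x ∈ N := by
  induction n generalizing x with
  | zero => exact hx
  | succ m ih => exact ih (pstep p x) (hcl x hx)

theorem R_mem (p : PySem.Dict String String) (N : List String) (R : String → String)
    (hInv : InvP p N R) (x : String) (hx : x ∈ N) : R x ∈ N := by
  obtain ⟨-, hcl, hR⟩ := hInv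
  obtain ⟨⟨n, hn⟩, -⟩ := hR x hx
  exact hn ▸ iterP_mem p N hcl x hx n

-- a single call 'find(x)' with fuel p.size + 1, under the invariant
theorem find_call (p : PySem.Dict String String) (N : List String) (R : String → String)
    (hInv : InvP p N R) (x : String) (hx : x ∈ N) :
    ∃ q, findA p x (p.size + 1) = (R x, q) ∧ InvP q N R := by
  obtain ⟨hkeys, hcl, hR⟩ := hInv
  have hclk : ∀ y ∈ p.keys, pstep p y ∈ p.keys := by rw [hkeys]; exact hcl
  obtain ⟨⟨m, hm⟩, hfix⟩ := hR x hx
  have hex : ∃ n, pstep p (iterP p n x) = iterP p n x := ⟨m, by rw [hm]; exact hfix⟩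
  set n := Nat.find hex with hndef
  have hfixn : pstep p (iterP p n x) = iterP p n x := Nat.find_spec hex
  have hmin : ∀ j < n, pstep p (iterP p j x) ≠ iterP p j x := fun j hj => Nat.find_min hex hj
  have hle : n ≤ m := Nat.find_min' hex (by rw [hm]; exact hfix)
  have hnr : iterP p n x = R x := by
    have h1 : iterP p m x = iterP p (m - n) (iterP p n x) := by
      rw [← iterP_add, Nat.add_sub_cancel' hle]
    rw [iterP_fix p _ hfixn (m - n)] at h1
    rw [← hm]; exact h1.symm
  have hfixR : pstep p (R x) = R x := by rw [← hnr]; exact hfixn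
  have hnodes : ∀ j, iterP p j x ∈ N := fun j => iterP_mem p N hcl x hx j
  have hinj : ∀ i j, i < j → j ≤ n → iterP p i x ≠ iterP p j x := by
    intro i j hij hjn heq
    have hper : iterP p (j - i) (iterP p i x) = iterP p i x := by
      rw [← iterP_add, Nat.add_sub_cancel' (by omega), ← heq]
    have hreach : iterP p (n - i) (iterP p i x) = R x := by
      rw [← iterP_add, Nat.add_sub_cancel' (by omega), hnr]
    have hfixi := periodic_eq_fix p (iterP p i x) (R x) (j - i) (n - i) (by omega) hper hreach hfixR
    exact hmin i (by omega) (by rw [hfixi, hfixR])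
  have hlen : n + 1 ≤ N.length := by
    have hnd : ((List.range (n+1)).map (fun j => iterP p j x)).Nodup := by
      refine List.Nodup.map_on ?_ (List.nodup_range)
      intro i hi j hj hij
      rcases Nat.lt_trichotomy i j with h | h | h
      · exact absurd hij (hinj i j h (by simp at hj; omega))
      · exact h
      · exact absurd hij.symm (hinj j i h (by simp at hi; omega))
    have hsub : ((List.range (n+1)).map (fun j => iterP p j x)) ⊆ N := by
      intro z hz
      simp only [List.mem_map] at hz
      obtain ⟨j, -, hj⟩ := hz
      exact hj ▸ hnodes j
    simpa using List.Subperm.length_le (List.subperm_of_subset hnd hsub)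
  have hsz : p.size = N.length := by
    have h1 : p.size = p.keys.length := by simp [PySem.Dict.size, PySem.Dict.keys]
    rw [h1, hkeys]
  obtain ⟨q, hfq, hkq, hclq, hpres⟩ := find_spec (p.size + 1) p x (R x) n hnr hfixR hmin
    (by omega) (hkeys ▸ hx) hclk
  refine ⟨q, hfq, by rw [hkq]; exact hkeys, ?_, fun y hy => hpres y (R y) (hR y hy)⟩
  intro y hy
  have := hclq y (by rw [hkq, hkeys]; exact hy)
  rw [hkq, hkeys] at this
  exact this

-- ===== the equivalence closure of a pair list =====

theorem EQ_refl (Q : List (String × String)) (x : String) : EQ Q x x :=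
  Relation.EqvGen.refl x

theorem EQ_symm {Q : List (String × String)} {x y : String} (h : EQ Q x y) : EQ Q y x :=
  Relation.EqvGen.symm x y h

theorem EQ_trans {Q : List (String × String)} {x y z : String}
    (h1 : EQ Q x y) (h2 : EQ Q y z) : EQ Q x z :=
  Relation.EqvGen.trans x y z h1 h2

theorem EQ_nil (x y : String) : EQ [] x y ↔ x = y := by
  constructor
  · intro h
    induction h with
    | rel _ _ h => simp at h
    | refl => rfl
    | symm _ _ _ ih => exact ih.symm
    | trans _ _ _ _ _ ih1 ih2 => exact ih1.trans ih2
  · rintro rfl; exact EQ_refl [] x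

theorem EQ_mono (Q : List (String × String)) (t : String × String) (x y : String)
    (h : EQ Q x y) : EQ (Q ++ [t]) x y :=
  Relation.EqvGen.mono (fun a b hab => by simp [hab]) h

theorem mem_nodesQ (Q : List (String × String)) (x : String) :
    x ∈ nodesQ Q ↔ ∃ t ∈ Q, x = t.1 ∨ x = t.2 := by
  have gen : ∀ (Q : List (String × String)) (N : List String),
      x ∈ Q.foldl (fun N t => PySem.Set.add (PySem.Set.add N t.1) t.2) N ↔
        x ∈ N ∨ ∃ t ∈ Q, x = t.1 ∨ x = t.2 := by
    intro Q
    induction Q with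
    | nil => simp
    | cons q l ih =>
      intro N
      simp only [List.foldl_cons, ih, PySem.Set.mem_add, List.mem_cons]
      constructor
      · intro h
        rcases h with ((h | h) | h) | ⟨t, ht, h⟩
        · exact Or.inl h
        · exact Or.inr ⟨q, Or.inl rfl, Or.inl h⟩
        · exact Or.inr ⟨q, Or.inl rfl, Or.inr h⟩
        · exact Or.inr ⟨t, Or.inr ht, h⟩
      · intro h
        rcases h with h | ⟨t, ht | ht, h⟩
        · exact Or.inl (Or.inl (Or.inl h))
        · subst ht
          rcases h with h | h
          · exact Or.inl (Or.inl (Or.inr h))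
          · exact Or.inl (Or.inr h)
        · exact Or.inr ⟨t, ht, h⟩
  rw [nodesQ, gen]; simp

theorem EQ_mem (Q : List (String × String)) (x y : String) (h : EQ Q x y) :
    x = y ∨ (x ∈ nodesQ Q ∧ y ∈ nodesQ Q) := by
  induction h with
  | rel u v h => exact Or.inr ⟨(mem_nodesQ Q u).2 ⟨(u,v), h, Or.inl rfl⟩,
      (mem_nodesQ Q v).2 ⟨(u,v), h, Or.inr rfl⟩⟩
  | refl => exact Or.inl rfl
  | symm _ _ _ ih => tauto
  | trans _ _ _ _ _ ih1 ih2 =>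
    rcases ih1 with rfl | ⟨h1, h2⟩
    · exact ih2
    · rcases ih2 with rfl | ⟨h3, h4⟩
      · exact Or.inr ⟨h1, h2⟩
      · exact Or.inr ⟨h1, h4⟩

theorem EQ_snoc (Q : List (String × String)) (a b x y : String) :
    EQ (Q ++ [(a, b)]) x y ↔
      EQ Q x y ∨ (EQ Q x a ∧ EQ Q b y) ∨ (EQ Q x b ∧ EQ Q a y) := by
  constructor
  · intro h
    induction h with
    | rel u v h =>
      rcases List.mem_append.1 h with h | h
      · exact Or.inl (Relation.EqvGen.rel u v h)
      · simp only [List.mem_singleton, Prod.mk.injEq] at h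
        obtain ⟨rfl, rfl⟩ := h
        exact Or.inr (Or.inl ⟨EQ_refl Q u, EQ_refl Q v⟩)
    | refl => exact Or.inl (EQ_refl Q _)
    | symm u v _ ih =>
      rcases ih with h | ⟨h1, h2⟩ | ⟨h1, h2⟩
      · exact Or.inl (EQ_symm h)
      · exact Or.inr (Or.inr ⟨EQ_symm h2, EQ_symm h1⟩)
      · exact Or.inr (Or.inl ⟨EQ_symm h2, EQ_symm h1⟩)
    | trans u v w _ _ ih1 ih2 =>
      rcases ih1 with h1 | ⟨h1, h1'⟩ | ⟨h1, h1'⟩ <;>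
        rcases ih2 with h2 | ⟨h2, h2'⟩ | ⟨h2, h2'⟩
      · exact Or.inl (EQ_trans h1 h2)
      · exact Or.inr (Or.inl ⟨EQ_trans h1 h2, h2'⟩)
      · exact Or.inr (Or.inr ⟨EQ_trans h1 h2, h2'⟩)
      · exact Or.inr (Or.inl ⟨h1, EQ_trans h1' h2⟩)
      · exact Or.inl (EQ_trans (EQ_trans h1 (EQ_symm (EQ_trans h1' h2))) h2')
      · exact Or.inl (EQ_trans h1 h2')
      · exact Or.inr (Or.inr ⟨h1, EQ_trans h1' h2⟩)
      · exact Or.inl (EQ_trans h1 h2')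
      · exact Or.inr (Or.inr ⟨h1, h2'⟩)
  · intro h
    have hab : EQ (Q ++ [(a, b)]) a b :=
      Relation.EqvGen.rel a b (by simp)
    rcases h with h | ⟨h1, h2⟩ | ⟨h1, h2⟩
    · exact Relation.EqvGen.mono (fun u v huv => by simp [huv]) h
    · exact EQ_trans (EQ_trans (EQ_mono Q _ _ _ h1) hab) (EQ_mono Q _ _ _ h2)
    · exact EQ_trans (EQ_trans (EQ_mono Q _ _ _ h1) (EQ_symm hab)) (EQ_mono Q _ _ _ h2)

theorem mergeK_self (h : String → String) (a b : String) (hab : h a = h b) (z : String) :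
    mergeK h a b z = h z := by
  unfold mergeK
  split
  · next h' => rw [hab]; exact h'.symm
  · rfl

theorem mergeK_iff (N : List String) (h : String → String) (Q : List (String × String))
    (a b : String)
    (hEq : ∀ x ∈ N, ∀ y ∈ N, (h x = h y ↔ EQ Q x y)) (ha : a ∈ N) (hb : b ∈ N) :
    ∀ x ∈ N, ∀ y ∈ N, (mergeK h a b x = mergeK h a b y ↔ EQ (Q ++ [(a, b)]) x y) := by
  intro x hx y hy
  rw [EQ_snoc]
  unfold mergeK
  by_cases hxb : h x = h b <;> by_cases hyb : h y = h b
  · rw [if_pos hxb, if_pos hyb]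
    have hxy : EQ Q x y := (hEq x hx y hy).1 (hxb.trans hyb.symm)
    simp [hxy]
  · rw [if_pos hxb, if_neg hyb]
    have hxB : EQ Q x b := (hEq x hx b hb).1 hxb
    constructor
    · intro hay
      exact Or.inr (Or.inr ⟨hxB, (hEq a ha y hy).1 hay⟩)
    · rintro (hxy | ⟨hxa, hby⟩ | ⟨hxb', hay⟩)
      · exact absurd ((hEq y hy b hb).2 (EQ_trans (EQ_symm hxy) hxB)) hyb
      · exact absurd ((hEq y hy b hb).2 (EQ_symm hby)) hyb
      · exact (hEq a ha y hy).2 hay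
  · rw [if_neg hxb, if_pos hyb]
    have hyB : EQ Q y b := (hEq y hy b hb).1 hyb
    constructor
    · intro hxa
      exact Or.inr (Or.inl ⟨(hEq x hx a ha).1 hxa, EQ_symm hyB⟩)
    · rintro (hxy | ⟨hxa, hby⟩ | ⟨hxb', hay⟩)
      · exact absurd ((hEq x hx b hb).2 (EQ_trans hxy hyB)) hxb
      · exact (hEq x hx a ha).2 hxa
      · exact absurd ((hEq x hx b hb).2 hxb') hxb
  · rw [if_neg hxb, if_neg hyb]
    rw [hEq x hx y hy]
    constructor
    · exact Or.inl
    · rintro (hxy | ⟨hxa, hby⟩ | ⟨hxb', hay⟩)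
      · exact hxy
      · exact absurd ((hEq y hy b hb).2 (EQ_symm hby)) hyb
      · exact absurd ((hEq x hx b hb).2 hxb') hxb

-- ===== small dict utilities =====

theorem keys_condInsert (d : PySem.Dict String String) (a : String) :
    (if d.contains a = true then d else d.insert a a).keys = PySem.Set.add d.keys a := by
  by_cases h : d.contains a = true
  · rw [if_pos h, PySem.Set.add_of_mem ((PySem.Dict.contains_iff_mem_keys d a).1 h)]
  · rw [if_neg h, PySem.Dict.keys_insert_of_not_contains d a (by simpa using h),
        PySem.Set.add_of_not_mem (fun hm => h ((PySem.Dict.contains_iff_mem_keys d a).2 hm))]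

theorem getD_condInsert (d : PySem.Dict String String) (a z : String) :
    (if d.contains a = true then d else d.insert a a).getD z z = d.getD z z := by
  by_cases h : d.contains a = true
  · rw [if_pos h]
  · rw [if_neg h, PySem.Dict.getD_insert]
    split
    · next hz =>
      subst hz
      exact (PySem.Dict.getD_of_not_contains d z (by simpa using h)).symm
    · rfl

theorem getD_fresh (d : PySem.Dict String String) (z : String) (hz : z ∉ d.keys) :
    d.getD z z = z :=
  PySem.Dict.getD_of_not_contains d z
    (by rw [← Bool.not_eq_true]; exact fun hc => hz ((PySem.Dict.contains_iff_mem_keys d z).1 hc))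

-- ===== proof-side names for the folds appearing in the two ports =====

def msFold (nd : List (String × String × Int)) : PySem.Dict String String :=
  nd.foldl (fun d t =>
    let d1 := if d.contains t.1 then d else d.insert t.1 t.1
    if d1.contains t.2.1 then d1 else d1.insert t.2.1 t.2.1) PySem.Dict.empty

def unFold (nd : List (String × String × Int)) (p : PySem.Dict String String) :
    PySem.Dict String String :=
  nd.foldl (fun d t => unionA d t.1 t.2.1) p

def grFold (l : List String) (p : PySem.Dict String String) :
    PySem.Dict String (List String) × PySem.Dict String String :=
  l.foldl (fun (s : PySem.Dict String (List String) × PySem.Dict String String) img =>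
    let r := findA s.2 img (s.2.size + 1)
    (s.1.modify r.1 [] (· ++ [img]), r.2)) (PySem.Dict.empty, p)

def labFold (nd : List (String × String × Int)) : PySem.Dict String String :=
  nd.foldl (fun L t =>
    let L1 := if L.contains t.1 then L else L.insert t.1 t.1
    let L2 := if L1.contains t.2.1 then L1 else L1.insert t.2.1 t.2.1
    let la := L2.getD t.1 t.1
    let lb := L2.getD t.2.1 t.2.1
    if la ≠ lb then relabelB L2 la lb else L2) PySem.Dict.empty

theorem A_as_folds (nd : List (String × String × Int)) :
    group_similar_images nd = (grFold (unFold nd (msFold nd)).keys (unFold nd (msFold nd))).1.values := rfl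

theorem B_as_folds (nd : List (String × String × Int)) :
    group_similar_images_alt nd =
      ((labFold nd).keys.foldl
        (fun d img => d.modify ((labFold nd).getD img img) [] (· ++ [img]))
        PySem.Dict.empty).values := rfl

-- ===== the make_set loop =====

theorem makeset_keys (nd : List (String × String × Int)) :
    ∀ d : PySem.Dict String String,
      (nd.foldl (fun d t =>
        let d1 := if d.contains t.1 then d else d.insert t.1 t.1
        if d1.contains t.2.1 then d1 else d1.insert t.2.1 t.2.1) d).keys
      = (nd.map (fun t => (t.1, t.2.1))).foldl
          (fun N q => PySem.Set.add (PySem.Set.add N q.1) q.2) d.keys := by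
  induction nd with
  | nil => intro d; rfl
  | cons t l ih =>
    intro d
    rw [List.map_cons, List.foldl_cons, List.foldl_cons, ih]
    congr 1
    rw [keys_condInsert, keys_condInsert]

theorem makeset_getD (nd : List (String × String × Int)) :
    ∀ (d : PySem.Dict String String) (z : String),
      (∀ w, d.getD w w = w) →
      (nd.foldl (fun d t =>
        let d1 := if d.contains t.1 then d else d.insert t.1 t.1
        if d1.contains t.2.1 then d1 else d1.insert t.2.1 t.2.1) d).getD z z = z := by
  induction nd with
  | nil => intro d z hid; exact hid z
  | cons t l ih =>
    intro d z hid
    rw [List.foldl_cons]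
    exact ih _ z (fun w => by rw [getD_condInsert, getD_condInsert]; exact hid w)

theorem msFold_keys (nd : List (String × String × Int)) :
    (msFold nd).keys = nodesQ (nd.map (fun t => (t.1, t.2.1))) := by
  rw [msFold, makeset_keys nd PySem.Dict.empty, PySem.Dict.keys_empty, nodesQ]

-- ===== grouping loop: dict-of-lists built with modify, characterized =====

theorem group_vals (key : String → String) (N : List String) :
    (N.foldl (fun d x => d.modify (key x) [] (· ++ [x])) PySem.Dict.empty).values
      = (PySem.Set.ofList (N.map key)).map (fun k => N.filter (fun x => key x == k)) := by
  have hnd : (N.foldl (fun d x => d.modify (key x) [] (· ++ [x])) PySem.Dict.empty).keys.Nodup :=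
    PySem.Dict.nodup_keys_foldl_modify_key N key [] (fun _ x => (· ++ [x])) PySem.Dict.empty
      (by rw [PySem.Dict.keys_empty]; exact List.nodup_nil)
  rw [PySem.Dict.values_eq_map_keys _ hnd [],
      PySem.Dict.keys_foldl_modify_key N key [] (fun _ x => (· ++ [x])) PySem.Dict.empty,
      PySem.Dict.keys_empty, PySem.Set.update_nil_left]
  refine List.map_congr_left (fun k hk => ?_)
  have h1 : (N.foldl (fun d x => d.modify (key x) [] (· ++ [x])) PySem.Dict.empty)
      = ((N.map (fun x => (key x, x))).foldl
          (fun d p => d.modify p.1 [] (· ++ [p.2])) PySem.Dict.empty) := by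
    rw [List.foldl_map]
  rw [h1, PySem.Dict.getD_foldl_modify_append, PySem.Dict.getD_empty, List.nil_append,
      List.filter_map, List.map_map]
  simp [Function.comp_def]

-- two key functions inducing the same partition produce the same grouped output
theorem group_congr (N : List String) (f g : String → String)
    (hfg : ∀ x ∈ N, ∀ y ∈ N, (f x = f y ↔ g x = g y)) :
    ∀ P : List String, (∀ x ∈ P, x ∈ N) →
      (PySem.Set.ofList (P.map f)).map (fun k => N.filter (fun x => f x == k))
        = (PySem.Set.ofList (P.map g)).map (fun k => N.filter (fun x => g x == k)) := by
  intro P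
  induction P using List.reverseRecOn with
  | nil => intro _; rfl
  | append_singleton l z ih =>
    intro hsub
    have hz : z ∈ N := hsub z (by simp)
    have hl : ∀ x ∈ l, x ∈ N := fun x hx => hsub x (by simp [hx])
    rw [List.map_append, List.map_append, List.map_singleton, List.map_singleton,
        PySem.Set.ofList_append_singleton, PySem.Set.ofList_append_singleton,
        PySem.Set.add_eq_ite, PySem.Set.add_eq_ite]
    have hmem : f z ∈ PySem.Set.ofList (l.map f) ↔ g z ∈ PySem.Set.ofList (l.map g) := by
      rw [PySem.Set.mem_ofList, PySem.Set.mem_ofList]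
      simp only [List.mem_map]
      constructor
      · rintro ⟨w, hw, hfw⟩; exact ⟨w, hw, (hfg w (hl w hw) z hz).1 hfw⟩
      · rintro ⟨w, hw, hgw⟩; exact ⟨w, hw, (hfg w (hl w hw) z hz).2 hgw⟩
    by_cases hin : f z ∈ PySem.Set.ofList (l.map f)
    · rw [if_pos hin, if_pos (hmem.1 hin)]
      exact ih hl
    · rw [if_neg hin, if_neg (fun h => hin (hmem.2 h)), List.map_append, List.map_append, ih hl]
      congr 1
      simp only [List.map_singleton]
      congr 1
      refine List.filter_congr (fun x hx => ?_)
      have hiff := hfg x hx z hz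
      by_cases hfx : f x = f z
      · simp [hfx, hiff.1 hfx]
      · have hgx : ¬ g x = g z := fun h => hfx (hiff.2 h)
        simp [hfx, hgx]

-- ===== the union loop =====

theorem union_step (N : List String) (p : PySem.Dict String String) (R : String → String)
    (hInv : InvP p N R) (a b : String) (ha : a ∈ N) (hb : b ∈ N) :
    InvP (unionA p a b) N (mergeK R a b) := by
  obtain ⟨q1, hf1, hi1⟩ := find_call p N R hInv a ha
  obtain ⟨q2, hf2, hi2⟩ := find_call q1 N R hi1 b hb
  have hun : unionA p a b = if R a ≠ R b then q2.insert (R b) (R a) else q2 := by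
    simp only [unionA, hf1, hf2]
  obtain ⟨hk, hcl, hR⟩ := hi2
  by_cases hrab : R a = R b
  · rw [hun, if_neg (by simpa using hrab)]
    exact ⟨hk, hcl, fun y hy => by rw [mergeK_self R a b hrab y]; exact hR y hy⟩
  · rw [hun, if_pos hrab]
    have hub : pstep q2 (R b) = R b := (hR b hb).2
    have hua : pstep q2 (R a) = R a := (hR a ha).2
    have hRbN : R b ∈ N := R_mem q2 N R ⟨hk, hcl, hR⟩ b hb
    have hRaN : R a ∈ N := R_mem q2 N R ⟨hk, hcl, hR⟩ a ha
    have hlink := link_preserves q2 (R b) (R a) hub hua hrab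
    refine ⟨?_, ?_, ?_⟩
    · rw [PySem.Dict.keys_insert_of_contains q2 (R a)
        ((PySem.Dict.contains_iff_mem_keys q2 (R b)).2 (hk ▸ hRbN))]
      exact hk
    · intro y hy
      rw [pstep_insert]
      split
      · exact hRaN
      · exact hcl y hy
    · intro y hy
      have hres := hlink y (R y) (hR y hy)
      simpa [mergeK] using hres

theorem union_fold (N : List String) :
    ∀ (l : List (String × String × Int)) (Q : List (String × String))
      (p : PySem.Dict String String) (R : String → String),
      InvP p N R →
      (∀ x ∈ N, ∀ y ∈ N, (R x = R y ↔ EQ Q x y)) →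
      (∀ t ∈ l, t.1 ∈ N ∧ t.2.1 ∈ N) →
      ∃ R', InvP (l.foldl (fun d t => unionA d t.1 t.2.1) p) N R' ∧
        (∀ x ∈ N, ∀ y ∈ N, (R' x = R' y ↔ EQ (Q ++ l.map (fun t => (t.1, t.2.1))) x y)) := by
  intro l
  induction l with
  | nil =>
    intro Q p R hInv hEq _
    exact ⟨R, hInv, by simpa using hEq⟩
  | cons t l ih =>
    intro Q p R hInv hEq hmem
    have ht := hmem t (by simp)
    have hstep := union_step N p R hInv t.1 t.2.1 ht.1 ht.2
    have hEq' := mergeK_iff N R Q t.1 t.2.1 hEq ht.1 ht.2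
    obtain ⟨R', hInv', hEq''⟩ := ih (Q ++ [(t.1, t.2.1)]) (unionA p t.1 t.2.1)
      (mergeK R t.1 t.2.1) hstep hEq' (fun s hs => hmem s (by simp [hs]))
    rw [List.foldl_cons]
    exact ⟨R', hInv', fun x hx y hy => by simpa using hEq'' x hx y hy⟩

-- ===== the grouping loop of A (find mutates the parent dict as it goes) =====

theorem loop3 (N : List String) (R : String → String) :
    ∀ (l : List String) (d : PySem.Dict String (List String)) (p : PySem.Dict String String),
      InvP p N R → (∀ x ∈ l, x ∈ N) →
      (l.foldl (fun (s : PySem.Dict String (List String) × PySem.Dict String String) img =>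
          let r := findA s.2 img (s.2.size + 1)
          (s.1.modify r.1 [] (· ++ [img]), r.2)) (d, p)).1
        = l.foldl (fun d img => d.modify (R img) [] (· ++ [img])) d := by
  intro l
  induction l with
  | nil => intro d p _ _; rfl
  | cons x l ih =>
    intro d p hInv hsub
    obtain ⟨q, hf, hi⟩ := find_call p N R hInv x (hsub x (by simp))
    rw [List.foldl_cons, List.foldl_cons]
    have hstep : (let r := findA (d, p).2 x ((d, p).2.size + 1)
        ((d, p).1.modify r.1 [] (· ++ [x]), r.2))
        = (d.modify (R x) [] (· ++ [x]), q) := by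
      show (d.modify (findA p x (p.size + 1)).1 [] (· ++ [x]), (findA p x (p.size + 1)).2) = _
      rw [hf]
    rw [hstep]
    exact ih _ q hi (fun z hz => hsub z (by simp [hz]))

-- ===== B side: the relabelling pass =====

theorem nodesQ_snoc (Q : List (String × String)) (t : String × String) :
    nodesQ (Q ++ [t]) = PySem.Set.add (PySem.Set.add (nodesQ Q) t.1) t.2 := by
  rw [nodesQ, nodesQ, List.foldl_append]
  rfl

theorem get?_relabelB (L : PySem.Dict String String) (la lb z : String) :
    (relabelB L la lb).get? z = (L.get? z).map (fun v => if v = lb then la else v) := by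
  obtain ⟨items⟩ := L
  induction items with
  | nil => rfl
  | cons kv rest ih =>
    obtain ⟨k, v⟩ := kv
    show (PySem.Dict.mk (((k, v) :: rest).map (fun kv => if kv.2 = lb then (kv.1, la) else kv))).get? z = _
    rw [List.map_cons]
    by_cases hv : v = lb
    · rw [show (if ((k, v) : String × String).2 = lb then (k, la) else (k, v)) = (k, la) from by simp [hv],
          PySem.Dict.get?_mk_cons, PySem.Dict.get?_mk_cons]
      by_cases hk : (k == z) = true
      · rw [if_pos hk, if_pos hk]
        simp [hv]
      · rw [if_neg hk, if_neg hk]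
        exact ih
    · rw [show (if ((k, v) : String × String).2 = lb then (k, la) else (k, v)) = (k, v) from by simp [hv],
          PySem.Dict.get?_mk_cons, PySem.Dict.get?_mk_cons]
      by_cases hk : (k == z) = true
      · rw [if_pos hk, if_pos hk]
        simp [hv]
      · rw [if_neg hk, if_neg hk]
        exact ih

theorem keys_relabelB (L : PySem.Dict String String) (la lb : String) :
    (relabelB L la lb).keys = L.keys := by
  show (L.items.map (fun kv => if kv.2 = lb then (kv.1, la) else kv)).map Prod.fst
      = L.items.map Prod.fst
  rw [List.map_map]
  refine List.map_congr_left (fun kv _ => ?_)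
  by_cases h : kv.2 = lb <;> simp [h]

theorem getD_relabelB (L : PySem.Dict String String) (la lb z : String) (hz : z ∈ L.keys) :
    (relabelB L la lb).getD z z = (if L.getD z z = lb then la else L.getD z z) := by
  have hc : L.contains z = true := (PySem.Dict.contains_iff_mem_keys L z).2 hz
  rw [PySem.Dict.contains_eq_isSome_get?] at hc
  obtain ⟨v, hv⟩ := Option.isSome_iff_exists.1 hc
  rw [PySem.Dict.getD_eq_get?_getD, PySem.Dict.getD_eq_get?_getD, get?_relabelB, hv]
  rfl

-- the per-pair step of B's label loop preserves the label invariant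
theorem label_step (Q : List (String × String)) (L L1 L2 LL : PySem.Dict String String)
    (a b : String)
    (h1 : L1 = if L.contains a then L else L.insert a a)
    (h2 : L2 = if L1.contains b then L1 else L1.insert b b)
    (h3 : LL = if L2.getD a a ≠ L2.getD b b then relabelB L2 (L2.getD a a) (L2.getD b b) else L2)
    (hInv : InvB L Q) : InvB LL (Q ++ [(a, b)]) := by
  obtain ⟨hkeys, hcl, hEq⟩ := hInv
  have hk2 : L2.keys = PySem.Set.add (PySem.Set.add L.keys a) b := by
    rw [h2, keys_condInsert, h1, keys_condInsert]
  have hg2 : ∀ z, L2.getD z z = L.getD z z := fun z => by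
    rw [h2, getD_condInsert, h1, getD_condInsert]
  have ha2 : a ∈ L2.keys := by rw [hk2]; simp [PySem.Set.mem_add]
  have hb2 : b ∈ L2.keys := by rw [hk2]; simp [PySem.Set.mem_add]
  have hsup : ∀ z ∈ L.keys, z ∈ L2.keys := fun z hz => by
    rw [hk2]; simp [PySem.Set.mem_add, hz]
  have hg2cl : ∀ z ∈ L2.keys, L2.getD z z ∈ L2.keys := by
    intro z hz
    rw [hg2]
    by_cases hzL : z ∈ L.keys
    · exact hsup _ (hcl z hzL)
    · rw [getD_fresh L z hzL]; exact hz
  have hEq2 : ∀ x ∈ L2.keys, ∀ y ∈ L2.keys, (L2.getD x x = L2.getD y y ↔ EQ Q x y) := by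
    intro x hx y hy
    rw [hg2, hg2]
    by_cases hxL : x ∈ L.keys <;> by_cases hyL : y ∈ L.keys
    · exact hEq x hxL y hyL
    · constructor
      · intro h
        rw [getD_fresh L y hyL] at h
        exact absurd (h ▸ hcl x hxL) hyL
      · intro h
        rcases EQ_mem Q x y h with heq | ⟨_, hy'⟩
        · subst heq; rfl
        · exact absurd (by rw [hkeys]; exact hy') hyL
    · constructor
      · intro h
        rw [getD_fresh L x hxL] at h
        exact absurd (h ▸ hcl y hyL : x ∈ L.keys) hxL
      · intro h
        rcases EQ_mem Q x y h with heq | ⟨hx', _⟩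
        · subst heq; rfl
        · exact absurd (by rw [hkeys]; exact hx') hxL
    · rw [getD_fresh L x hxL, getD_fresh L y hyL]
      constructor
      · intro h; subst h; exact EQ_refl Q x
      · intro h
        rcases EQ_mem Q x y h with heq | ⟨hx', _⟩
        · exact heq
        · exact absurd (by rw [hkeys]; exact hx') hxL
  have hmrg := mergeK_iff L2.keys (fun z => L2.getD z z) Q a b hEq2 ha2 hb2
  have hk' : LL.keys = L2.keys := by
    rw [h3]; split
    · exact keys_relabelB L2 _ _
    · rfl
  have hg' : ∀ z ∈ L2.keys, LL.getD z z = mergeK (fun w => L2.getD w w) a b z := by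
    intro z hz
    rw [h3]
    by_cases hne : L2.getD a a ≠ L2.getD b b
    · rw [if_pos hne, getD_relabelB L2 _ _ z hz]
      rfl
    · rw [if_neg hne]
      exact (mergeK_self (fun w => L2.getD w w) a b (not_not.1 hne) z).symm
  refine ⟨?_, ?_, ?_⟩
  · rw [hk', hk2, hkeys, nodesQ_snoc]
  · intro x hx
    rw [hk'] at hx
    rw [hk', hg' x hx]
    unfold mergeK
    split
    · exact hg2cl a ha2
    · exact hg2cl x hx
  · intro x hx y hy
    rw [hk'] at hx hy
    rw [hg' x hx, hg' y hy]
    exact hmrg x hx y hy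

theorem label_fold :
    ∀ (l : List (String × String × Int)) (Q : List (String × String))
      (L : PySem.Dict String String),
      InvB L Q →
      InvB (l.foldl (fun L t =>
          let L1 := if L.contains t.1 then L else L.insert t.1 t.1
          let L2 := if L1.contains t.2.1 then L1 else L1.insert t.2.1 t.2.1
          let la := L2.getD t.1 t.1
          let lb := L2.getD t.2.1 t.2.1
          if la ≠ lb then relabelB L2 la lb else L2) L)
        (Q ++ l.map (fun t => (t.1, t.2.1))) := by
  intro l
  induction l with
  | nil => intro Q L h; simpa using h
  | cons t l ih =>
    intro Q L hInv
    rw [List.foldl_cons]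
    have hstep := label_step Q L _ _ _ t.1 t.2.1 rfl rfl rfl hInv
    have hres := ih (Q ++ [(t.1, t.2.1)]) _ hstep
    simpa using hres

-- ===== assembling the two sides =====

theorem AB_eq (nd : List (String × String × Int)) :
    group_similar_images nd = group_similar_images_alt nd := by
  -- the shared node list, in first-appearance order
  have hmsk : (msFold nd).keys = nodesQ (nd.map (fun t => (t.1, t.2.1))) := msFold_keys nd
  have hmsid : ∀ z, (msFold nd).getD z z = z :=
    fun z => makeset_getD nd PySem.Dict.empty z (fun w => PySem.Dict.getD_empty w w)
  have hInv0 : InvP (msFold nd) (nodesQ (nd.map (fun t => (t.1, t.2.1)))) (fun z => z) := by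
    refine ⟨hmsk, ?_, ?_⟩
    · intro y hy
      have hp : pstep (msFold nd) y = y := hmsid y
      rw [hp]; exact hy
    · intro y _
      exact ⟨⟨0, rfl⟩, hmsid y⟩
  have hEq0 : ∀ x ∈ nodesQ (nd.map (fun t => (t.1, t.2.1))),
      ∀ y ∈ nodesQ (nd.map (fun t => (t.1, t.2.1))),
      ((fun z => z) x = (fun z => z) y ↔ EQ [] x y) := by
    intro x _ y _
    simpa using (EQ_nil x y).symm
  have hmemQ : ∀ t ∈ nd, t.1 ∈ nodesQ (nd.map (fun t => (t.1, t.2.1)))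
      ∧ t.2.1 ∈ nodesQ (nd.map (fun t => (t.1, t.2.1))) := by
    intro t ht
    constructor
    · exact (mem_nodesQ _ t.1).2 ⟨(t.1, t.2.1), List.mem_map.2 ⟨t, ht, rfl⟩, Or.inl rfl⟩
    · exact (mem_nodesQ _ t.2.1).2 ⟨(t.1, t.2.1), List.mem_map.2 ⟨t, ht, rfl⟩, Or.inr rfl⟩
  obtain ⟨R', hInv2, hEq'⟩ := union_fold (nodesQ (nd.map (fun t => (t.1, t.2.1)))) nd []
    (msFold nd) (fun z => z) hInv0 hEq0 hmemQ
  have hInv2' : InvP (unFold nd (msFold nd)) (nodesQ (nd.map (fun t => (t.1, t.2.1)))) R' := hInv2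
  have hEq2 : ∀ x ∈ nodesQ (nd.map (fun t => (t.1, t.2.1))),
      ∀ y ∈ nodesQ (nd.map (fun t => (t.1, t.2.1))),
      (R' x = R' y ↔ EQ (nd.map (fun t => (t.1, t.2.1))) x y) := by
    intro x hx y hy
    simpa using hEq' x hx y hy
  have hk2 : (unFold nd (msFold nd)).keys = nodesQ (nd.map (fun t => (t.1, t.2.1))) := hInv2'.1
  -- A's value
  have hA : group_similar_images nd
      = ((nodesQ (nd.map (fun t => (t.1, t.2.1)))).foldl
          (fun d img => d.modify (R' img) [] (· ++ [img])) PySem.Dict.empty).values := by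
    rw [A_as_folds]
    unfold grFold
    rw [loop3 (nodesQ (nd.map (fun t => (t.1, t.2.1)))) R' (unFold nd (msFold nd)).keys
      PySem.Dict.empty (unFold nd (msFold nd)) hInv2' (by rw [hk2]; exact fun z h => h), hk2]
  -- B's invariant
  have hInvB : InvB (labFold nd) (nd.map (fun t => (t.1, t.2.1))) := by
    have h0 : InvB PySem.Dict.empty [] := by
      refine ⟨?_, ?_, ?_⟩ <;> simp [PySem.Dict.keys_empty, nodesQ]
    have hres := label_fold nd [] PySem.Dict.empty h0
    simpa [labFold] using hres
  obtain ⟨hkB, hclB, hEqB⟩ := hInvB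
  -- B's value
  have hB : group_similar_images_alt nd
      = ((nodesQ (nd.map (fun t => (t.1, t.2.1)))).foldl
          (fun d img => d.modify ((labFold nd).getD img img) [] (· ++ [img]))
          PySem.Dict.empty).values := by
    rw [B_as_folds, hkB]
  rw [hA, hB, group_vals R' _, group_vals (fun img => (labFold nd).getD img img) _]
  exact group_congr (nodesQ (nd.map (fun t => (t.1, t.2.1)))) R'
    (fun img => (labFold nd).getD img img)
    (fun x hx y hy => by
      rw [hEq2 x hx y hy]
      rw [← hEqB x (by rw [hkB]; exact hx) y (by rw [hkB]; exact hy)])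
    (nodesQ (nd.map (fun t => (t.1, t.2.1)))) (fun x hx => hx)

-- ===== VERDICT (by name: the statement is the Claim_ definition above) =====
theorem group_similar_images_spec : Claim_equal_group_similar_images := by
  intro nd _
  show group_similar_images nd = group_similar_images_alt nd
  exact AB_eq nd
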